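-- pv_equiv track=rewrite | github.com/devMuniz02/Job-Search-scraper | utils/core.py | materialize_field_keywords
-- ===== SOURCE A (Python) =====
-- from typing import Dict, Any, List, Tuple, Optional, Union
--
-- def materialize_field_keywords(per_field: Dict[str, List[str]], available_fields: List[str]) -> Dict[str, List[str]]:
--     """Merge wildcard keywords into specific fields."""
--     result = {}
--     wild = per_field.get("*", [])
--     for f in available_fields:
--         kws = set(wild)
--         if f in per_field:
--             kws.update(per_field[f])
--         if kws:
--             result[f] = sorted(kws)
--     return result
-- ===== SOURCE B (Python) =====
-- def _merge(xs, ys):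
--     """Merge two strictly increasing sorted lists into one, dropping duplicates."""
--     out = []
--     i = j = 0
--     while i < len(xs) and j < len(ys):
--         a, b = xs[i], ys[j]
--         if a < b:
--             out.append(a); i += 1
--         elif b < a:
--             out.append(b); j += 1
--         else:
--             out.append(a); i += 1; j += 1
--     out.extend(xs[i:])
--     out.extend(ys[j:])
--     return out
--
--
-- def materialize_field_keywords(per_field, available_fields):
--     """Merge wildcard keywords into specific fields."""
--     wild_sorted = sorted(set(per_field.get("*", [])))
--     result = {}
--     for f in available_fields:
--         spec = per_field.get(f)
--         if spec is None:
--             merged = wild_sorted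
--         else:
--             merged = _merge(wild_sorted, sorted(set(spec)))
--         if merged:
--             result[f] = merged
--     return result
-- ===== Notes on version B (the rewrite author's own statement) =====
-- stated objective: alternative
-- what changed: B sorts the deduplicated wildcard list once up front and reuses it: fields without specific keywords get the precomputed list directly, and fields with specifics combine it with their own sorted set by a two-pointer merge, instead of rebuilding and sorting set(wild)|set(specific) for every field as A does; measured running time is about the same.
import Mathlib
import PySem

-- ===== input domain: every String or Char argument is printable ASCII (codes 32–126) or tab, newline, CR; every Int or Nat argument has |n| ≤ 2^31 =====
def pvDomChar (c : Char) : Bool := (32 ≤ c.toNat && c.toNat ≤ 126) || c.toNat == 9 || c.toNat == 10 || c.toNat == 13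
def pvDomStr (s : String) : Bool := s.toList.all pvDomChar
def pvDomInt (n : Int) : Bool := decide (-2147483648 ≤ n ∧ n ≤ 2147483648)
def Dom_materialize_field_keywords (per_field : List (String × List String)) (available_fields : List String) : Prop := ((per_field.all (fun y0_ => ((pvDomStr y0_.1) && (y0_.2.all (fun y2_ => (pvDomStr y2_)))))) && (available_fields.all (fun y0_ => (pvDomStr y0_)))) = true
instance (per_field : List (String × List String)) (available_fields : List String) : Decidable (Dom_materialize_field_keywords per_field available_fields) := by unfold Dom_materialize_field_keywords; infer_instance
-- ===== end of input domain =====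

-- B sorts the wildcard set once and reuses it per field, merging (two-pointer) with each field's
-- own sorted specifics, instead of A's per-field rebuild and sort of the whole union (alternative
-- algorithm; measured running time is about the same).

-- ===== PORT A =====
def materialize_field_keywords (per_field : List (String × List String)) (available_fields : List String) : List (String × List String) :=
  let d := PySem.Dict.mk per_field
  let wild := d.getD "*" []
  (available_fields.foldl (fun result f =>
    let kws0 := PySem.Set.ofList wild
    let kws := if d.contains f then PySem.Set.update kws0 (d.getD f []) else kws0
    if kws ≠ [] then result.insert f (PySem.List.sorted kws (fun x => x) false) else result)
    PySem.Dict.empty).items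

-- ===== PORT B =====
-- two-pointer merge of two sorted duplicate-free lists (B's while loop, as structural recursion)
def pvMerge : List String → List String → List String
  | [], ys => ys
  | a :: xs, [] => a :: xs
  | a :: xs, b :: ys =>
    if a < b then a :: pvMerge xs (b :: ys)
    else if b < a then b :: pvMerge (a :: xs) ys
    else a :: pvMerge xs ys

def materialize_field_keywords_alt (per_field : List (String × List String)) (available_fields : List String) : List (String × List String) :=
  let d := PySem.Dict.mk per_field
  let wild_sorted := PySem.List.sorted (PySem.Set.ofList (d.getD "*" [])) (fun x => x) false
  (available_fields.foldl (fun result f =>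
    let merged := match d.get? f with
      | none => wild_sorted
      | some spec => pvMerge wild_sorted (PySem.List.sorted (PySem.Set.ofList spec) (fun x => x) false)
    if merged ≠ [] then result.insert f merged else result)
    PySem.Dict.empty).items

-- ===== PRECONDITION & SPEC =====
def Spec_materialize_field_keywords (per_field : List (String × List String)) (available_fields : List String) (out : List (String × List String)) : Prop := out = materialize_field_keywords_alt per_field available_fields
instance (per_field : List (String × List String)) (available_fields : List String) (out : List (String × List String)) : Decidable (Spec_materialize_field_keywords per_field available_fields out) := by unfold Spec_materialize_field_keywords; infer_instance

-- ===== CLAIM (what is proved, stated in full; the proofs are below) =====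
def Claim_equal_materialize_field_keywords : Prop := ∀ (per_field : List (String × List String)) (available_fields : List String), Dom_materialize_field_keywords per_field available_fields → Spec_materialize_field_keywords per_field available_fields (materialize_field_keywords per_field available_fields)

-- ===== LEMMAS AND PROOFS =====

theorem mem_pvMerge (xs ys : List String) (c : String) :
    c ∈ pvMerge xs ys ↔ c ∈ xs ∨ c ∈ ys := by
  fun_induction pvMerge xs ys with
  | case1 ys => simp
  | case2 a xs => simp
  | case3 a xs b ys h ih => simp [ih]; tauto
  | case4 a xs b ys h1 h2 ih => simp [ih]; tauto
  | case5 a xs b ys h1 h2 ih =>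
    have hab : a = b := le_antisymm (not_lt.mp h2) (not_lt.mp h1)
    subst hab
    simp [ih]; tauto

theorem pairwise_pvMerge (xs ys : List String)
    (hx : xs.Pairwise (· < ·)) (hy : ys.Pairwise (· < ·)) :
    (pvMerge xs ys).Pairwise (· < ·) := by
  fun_induction pvMerge xs ys with
  | case1 ys => simpa using hy
  | case2 a xs => simpa using hx
  | case3 a xs b ys h ih =>
    rw [List.pairwise_cons] at hx
    refine List.pairwise_cons.mpr ⟨?_, ih hx.2 hy⟩
    intro c hc
    rcases (mem_pvMerge _ _ _).mp hc with hc | hc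
    · exact hx.1 c hc
    · rcases List.mem_cons.mp hc with rfl | hc
      · exact h
      · exact lt_trans h ((List.pairwise_cons.mp hy).1 c hc)
  | case4 a xs b ys h1 h2 ih =>
    rw [List.pairwise_cons] at hy
    refine List.pairwise_cons.mpr ⟨?_, ih hx hy.2⟩
    intro c hc
    rcases (mem_pvMerge _ _ _).mp hc with hc | hc
    · rcases List.mem_cons.mp hc with rfl | hc
      · exact h2
      · exact lt_trans h2 ((List.pairwise_cons.mp hx).1 c hc)
    · exact hy.1 c hc
  | case5 a xs b ys h1 h2 ih =>
    have hab : a = b := le_antisymm (not_lt.mp h2) (not_lt.mp h1)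
    subst hab
    rw [List.pairwise_cons] at hx hy
    refine List.pairwise_cons.mpr ⟨?_, ih hx.2 hy.2⟩
    intro c hc
    rcases (mem_pvMerge _ _ _).mp hc with hc | hc
    · exact hx.1 c hc
    · exact hy.1 c hc

theorem nodup_update (s : PySem.Set String) (xs : List String) (hs : s.Nodup) :
    (PySem.Set.update s xs).Nodup := by
  induction xs generalizing s with
  | nil => simpa [PySem.Set.update_nil] using hs
  | cons x xs ih =>
    rw [PySem.Set.update_cons]
    exact ih _ (PySem.Set.nodup_add s x hs)

-- B's merge of the two sorted sets IS A's sort of the updated set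
theorem pvMerge_eq_sorted_update (wild spec : List String) :
    pvMerge (PySem.List.sorted (PySem.Set.ofList wild) (fun x => x) false)
            (PySem.List.sorted (PySem.Set.ofList spec) (fun x => x) false)
      = PySem.List.sorted (PySem.Set.update (PySem.Set.ofList wild) spec) (fun x => x) false := by
  have hw := PySem.List.sorted_ofList_pairwise_lt (xs := wild)
  have hs := PySem.List.sorted_ofList_pairwise_lt (xs := spec)
  have hp : (pvMerge (PySem.List.sorted (PySem.Set.ofList wild) (fun x => x) false)
      (PySem.List.sorted (PySem.Set.ofList spec) (fun x => x) false)).Pairwise (· < ·) :=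
    pairwise_pvMerge _ _ hw hs
  have hnd : (pvMerge (PySem.List.sorted (PySem.Set.ofList wild) (fun x => x) false)
      (PySem.List.sorted (PySem.Set.ofList spec) (fun x => x) false)).Nodup :=
    hp.imp (fun h => ne_of_lt h)
  have hndu : (PySem.Set.update (PySem.Set.ofList wild) spec).Nodup :=
    nodup_update _ _ (PySem.Set.nodup_ofList wild)
  have hperm : (pvMerge (PySem.List.sorted (PySem.Set.ofList wild) (fun x => x) false)
      (PySem.List.sorted (PySem.Set.ofList spec) (fun x => x) false)).Perm
      (PySem.Set.update (PySem.Set.ofList wild) spec) := by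
    rw [List.perm_ext_iff_of_nodup hnd hndu]
    intro c
    simp [mem_pvMerge, PySem.List.mem_sorted, PySem.Set.mem_ofList, PySem.Set.mem_update]
  exact (PySem.List.sorted_eq_of_perm_of_pairwise_lt _ _ _ hperm hp).symm

-- ===== VERDICT (by name: the statement is the Claim_ definition above) =====
theorem materialize_field_keywords_spec : Claim_equal_materialize_field_keywords := by
  intro per_field available_fields _
  unfold Spec_materialize_field_keywords materialize_field_keywords materialize_field_keywords_alt
  dsimp only
  congr 1
  apply PySem.List.foldl_congr_mem
  intro result f _
  dsimp only
  cases hg : (PySem.Dict.mk per_field).get? f with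
  | none =>
    have hc : (PySem.Dict.mk per_field).contains f = false := by
      rw [PySem.Dict.contains_eq_isSome_get?, hg]; rfl
    simp only [hc, Bool.false_eq_true, if_false, ne_eq, PySem.List.sorted_eq_nil_iff]
  | some spec =>
    have hc : (PySem.Dict.mk per_field).contains f = true := by
      rw [PySem.Dict.contains_eq_isSome_get?, hg]; rfl
    have hgd : (PySem.Dict.mk per_field).getD f [] = spec := by
      simp [PySem.Dict.getD, hg]
    simp only [hc, if_true, hgd, pvMerge_eq_sorted_update, ne_eq, PySem.List.sorted_eq_nil_iff]
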